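-- pv_equiv track=rewrite | github.com/syncsynchalt/illustrated-x25519 | plots/curve25519-field.py | shanksPartitions
-- ===== SOURCE A (Python) =====
-- def shanksPartitions(prime):
--     '''
--     "By factoring out powers of 2, find Q and S such that p−1 = Q*2^S with Q odd"
--     '''
--     Q = prime - 1
--     S = 0
--
--     while Q != 0 and Q % 2 == 0:
--         Q >>= 1
--         S += 1
--     assert Q != 0, 'Unexpected failure to factor out Shanks partitions'
--     return (Q, S)
-- ===== SOURCE B (Python) =====
-- def shanksPartitions(prime):
--     '''
--     "By factoring out powers of 2, find Q and S such that p-1 = Q*2^S with Q odd"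
--     '''
--     n = prime - 1
--     assert n != 0, 'Unexpected failure to factor out Shanks partitions'
--     s = (n & -n).bit_length() - 1
--     return (n >> s, s)
-- ===== Notes on version B (the rewrite author's own statement) =====
-- stated objective: simpler
-- what changed: The trailing-zero while-loop is replaced by a closed-form lowest-set-bit computation: S = (n & -n).bit_length() - 1 and Q = n >> S, with no loop at all.
-- outside the precondition, e.g. on shanksPartitions(1): A raises AssertionError, B raises AssertionError
import Mathlib
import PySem

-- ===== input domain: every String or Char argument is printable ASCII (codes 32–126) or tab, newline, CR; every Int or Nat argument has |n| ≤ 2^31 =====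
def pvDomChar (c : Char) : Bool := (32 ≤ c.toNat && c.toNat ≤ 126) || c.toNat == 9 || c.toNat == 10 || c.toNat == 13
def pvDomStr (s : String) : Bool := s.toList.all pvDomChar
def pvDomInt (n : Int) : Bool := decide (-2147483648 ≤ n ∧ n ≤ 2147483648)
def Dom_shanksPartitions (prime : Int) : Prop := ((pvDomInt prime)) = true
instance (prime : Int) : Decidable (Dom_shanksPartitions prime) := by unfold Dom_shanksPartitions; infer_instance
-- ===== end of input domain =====

-- B replaces A's trailing-zero while-loop by a closed-form lowest-set-bit computation
-- (S = (n & -n).bit_length() - 1, Q = n >> S); objective: simpler (no loop).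


-- ===== PORT A =====
-- the while loop of A, on the state (Q, S); `Q >>> 1` is Python's `Q >> 1` (floor shift)
def shanksLoop (Q : Int) (S : Int) : Int × Int :=
  if Q ≠ 0 ∧ PySem.Int.mod Q 2 = 0 then shanksLoop (Q >>> (1:Nat)) (S + 1) else (Q, S)
termination_by Q.natAbs
decreasing_by
  rename_i h
  obtain ⟨h0, h2⟩ := h
  rw [PySem.Int.mod_eq_emod_of_pos (by omega)] at h2
  rw [Int.shiftRight_eq_div_pow]
  omega

def shanksPartitions (prime : Int) : Int × Int :=
  -- the `assert Q != 0` raises exactly when prime = 1; that input is excluded by Pre_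
  shanksLoop (prime - 1) 0

-- ===== PORT B =====
def shanksPartitions_alt (prime : Int) : Int × Int :=
  let n := prime - 1
  -- assert n != 0 raises exactly when prime = 1; excluded by Pre_
  -- s = (n & -n).bit_length() - 1  (s is a nonnegative int on the admitted inputs, held as Nat)
  let s : Nat := PySem.Int.bitLength (PySem.Int.band n (-n)) - 1
  (n >>> s, (s : Int))

-- ===== PRECONDITION & SPEC =====
-- Pre_ excludes exactly prime = 1, where A's `assert Q != 0` raises AssertionError (B raises it too).
def Pre_shanksPartitions (prime : Int) : Prop := prime ≠ 1
instance (prime : Int) : Decidable (Pre_shanksPartitions prime) := by unfold Pre_shanksPartitions; infer_instance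
def pvWitness_shanksPartitions : Int := (13)

def Spec_shanksPartitions (prime : Int) (out : Int × Int) : Prop := out = shanksPartitions_alt prime
instance (prime : Int) (out : Int × Int) : Decidable (Spec_shanksPartitions prime out) := by unfold Spec_shanksPartitions; infer_instance

-- ===== CLAIM (what is proved, stated in full; the proofs are below) =====
def Claim_equal_shanksPartitions : Prop := ∀ (prime : Int), Dom_shanksPartitions prime → Pre_shanksPartitions prime → Spec_shanksPartitions prime (shanksPartitions prime)

-- ===== LEMMAS AND PROOFS =====

-- m - (m &&& (m-1)) is the lowest set bit of m (on Nat); band n (-n) computes it through natAbs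
def natF (m : Nat) : Nat := m - (m &&& (m - 1))

lemma band_neg_self (n : Int) : PySem.Int.band n (-n) = ((natF n.natAbs : Nat) : Int) := by
  rcases lt_trichotomy n 0 with h | h | h
  · have h1 : ¬ (0 ≤ n) := by omega
    have h2 : (0 : Int) ≤ -n := by omega
    simp only [PySem.Int.band, h1, if_false, h2, if_true]
    have e1 : (-n).toNat = n.natAbs := by omega
    have e2 : (-n - 1).toNat = n.natAbs - 1 := by omega
    rw [e1, e2, natF]
  · subst h; simp [PySem.Int.band, natF]
  · have h1 : (0 : Int) ≤ n := by omega
    have h2 : ¬ ((0 : Int) ≤ -n) := by omega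
    simp only [PySem.Int.band, h1, if_true, h2, if_false]
    have e1 : n.toNat = n.natAbs := by omega
    have e2 : (- -n - 1).toNat = n.natAbs - 1 := by omega
    rw [e1, e2, natF]

lemma natF_odd {m : Nat} (h : m % 2 = 1) : natF m = 1 := by
  have key : m &&& (m - 1) = m - 1 := by
    apply Nat.eq_of_testBit_eq
    intro i
    rw [Nat.testBit_and]
    cases i with
    | zero =>
      have : (m - 1) % 2 = 0 := by omega
      simp [Nat.testBit_zero, this]
    | succ i =>
      rw [Nat.testBit_add_one, Nat.testBit_add_one]
      have : (m - 1) / 2 = m / 2 := by omega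
      rw [this, Bool.and_self]
  rw [natF, key]; omega

lemma natF_even (a : Nat) : natF (2 * a) = 2 * natF a := by
  have key : (2 * a) &&& (2 * a - 1) = 2 * (a &&& (a - 1)) := by
    apply Nat.eq_of_testBit_eq
    intro i
    cases i with
    | zero =>
      have h1 : (2 * a) % 2 = 0 := by omega
      have h2 : (2 * (a &&& (a - 1))) % 2 = 0 := by omega
      simp [Nat.testBit_zero, h1, h2]
    | succ i =>
      have e1 : (2 * a) / 2 = a := by omega
      have e2 : (2 * a - 1) / 2 = a - 1 := by omega
      have e3 : (2 * (a &&& (a - 1))) / 2 = a &&& (a - 1) := by omega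
      rw [Nat.testBit_and, Nat.testBit_add_one, Nat.testBit_add_one, Nat.testBit_add_one,
        e1, e2, e3, Nat.testBit_and]
  have hle : a &&& (a - 1) ≤ a := Nat.and_le_left
  rw [natF, natF, key]
  omega

lemma natF_pos {m : Nat} (h : m ≠ 0) : 0 < natF m := by
  induction m using Nat.strong_induction_on with
  | _ m ih =>
    rcases Nat.even_or_odd m with he | ho
    · obtain ⟨a, ha⟩ := he
      have ha' : m = 2 * a := by omega
      have hane : a ≠ 0 := by omega
      rw [ha', natF_even a]
      have := ih a (by omega) hane
      omega
    · have : m % 2 = 1 := Nat.odd_iff.mp ho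
      rw [natF_odd this]; omega

lemma bitLength_two_mul {x : Nat} (h : 0 < x) :
    PySem.Int.bitLength ((2 * x : Nat) : Int) = PySem.Int.bitLength ((x : Nat) : Int) + 1 := by
  have := PySem.Int.bitLength_natCast (m := 2 * x) (by omega)
  rwa [show (2 * x) / 2 = x by omega] at this

lemma bitLength_pos {m : Nat} (h : 0 < m) : 0 < PySem.Int.bitLength ((m : Nat) : Int) := by
  rw [PySem.Int.bitLength_natCast h]; omega

-- the loop of A computes exactly B's closed form, for every nonzero Q and accumulator S
lemma shanksLoop_eq (k : Nat) : ∀ (Q : Int), Q.natAbs = k → Q ≠ 0 → ∀ (S : Int),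
    shanksLoop Q S = (Q >>> (PySem.Int.bitLength ((natF Q.natAbs : Nat) : Int) - 1),
      S + (((PySem.Int.bitLength ((natF Q.natAbs : Nat) : Int) - 1 : Nat) : Nat) : Int)) := by
  induction k using Nat.strong_induction_on with
  | _ k ih =>
    intro Q hk h0 S
    by_cases hmod : Q % 2 = 0
    · -- Q even: one loop step, then the induction hypothesis on Q >>> 1
      have hQ' : Q >>> (1:Nat) = Q / 2 := by
        rw [Int.shiftRight_eq_div_pow]; norm_num
      have hmodP : PySem.Int.mod Q 2 = 0 := by
        rw [PySem.Int.mod_eq_emod_of_pos (by omega)]; exact hmod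
      have hQ'ne : Q / 2 ≠ 0 := by omega
      have hQ'abs : (Q / 2).natAbs = Q.natAbs / 2 := by omega
      have hhalf : Q.natAbs = 2 * (Q / 2).natAbs := by omega
      have hrec := ih ((Q / 2).natAbs) (by omega) (Q / 2) rfl hQ'ne (S + 1)
      rw [shanksLoop]
      simp only [h0, hmodP, ne_eq, not_false_eq_true, and_self, if_true, hQ', hrec]
      have hFpos : 0 < natF (Q / 2).natAbs := natF_pos (by omega)
      have hbl : PySem.Int.bitLength ((natF Q.natAbs : Nat) : Int)
          = PySem.Int.bitLength ((natF (Q / 2).natAbs : Nat) : Int) + 1 := by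
        rw [hhalf, natF_even _]
        exact bitLength_two_mul hFpos
      have hblpos := bitLength_pos hFpos
      set b := PySem.Int.bitLength ((natF (Q / 2).natAbs : Nat) : Int) with hb
      have hs : PySem.Int.bitLength ((natF Q.natAbs : Nat) : Int) - 1 = (b - 1) + 1 := by omega
      rw [Prod.mk.injEq]
      refine ⟨?_, ?_⟩
      · rw [hs, ← hQ', ← Int.shiftRight_add, Nat.add_comm]
      · rw [hs]; push_cast; ring
    · -- Q odd: the loop stops at once, and natF = 1 gives shift 0
      have hmod1 : Q % 2 = 1 := by omega
      have hmodP : PySem.Int.mod Q 2 = 1 := by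
        rw [PySem.Int.mod_eq_emod_of_pos (by omega)]; exact hmod1
      have hF : natF Q.natAbs = 1 := natF_odd (by omega)
      rw [shanksLoop]
      simp only [hmodP, one_ne_zero, and_false, if_false, hF]
      have hbl : PySem.Int.bitLength ((1 : Nat) : Int) = 1 := by decide
      rw [hbl]
      simp [Int.shiftRight_zero]

-- ===== VERDICT (by name: the statement is the Claim_ definition above) =====
theorem shanksPartitions_spec : Claim_equal_shanksPartitions := by
  intro prime _ hpre
  unfold Spec_shanksPartitions shanksPartitions shanksPartitions_alt
  have hne : prime - 1 ≠ 0 := by unfold Pre_shanksPartitions at hpre; omega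
  show _ = ((prime - 1) >>> (PySem.Int.bitLength (PySem.Int.band (prime - 1) (-(prime - 1))) - 1),
    ((PySem.Int.bitLength (PySem.Int.band (prime - 1) (-(prime - 1))) - 1 : Nat) : Int))
  rw [shanksLoop_eq (prime - 1).natAbs (prime - 1) rfl hne 0, band_neg_self]
  simp
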